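-- pv_equiv track=rewrite | github.com/nhoofficial/CSE-220-Data-Structures- | Lab-01/Task 7.py | max_occ
-- ===== SOURCE A (Python) =====
-- def max_occ(lst):
--     dic={}
--     for i in lst:
--         dic[i]=0
--     for i in dic:
--         for j in lst:
--             if i==j:
--                 dic[i]+=1
--     idx=0
--     for i in dic:
--         if dic[i]>idx:
--             idx=dic[i]
--     x=None
--     for i in dic:
--         if dic[i]==idx:
--             x=i
--             break
--
--     n=0
--     newlst=[]
--     for i in lst:
--         if i==x:
--             n+=1
--         else:
--             if i!=x:
--                 newlst.append(n)
--                 n=0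
--
--     newlst.append(n)
--     hc=0
--     for i in range(len(newlst)):
--         if newlst[i]>hc:
--             hc=newlst[i]
--     return hc
-- ===== SOURCE B (Python) =====
-- def max_occ(lst):
--     counts = {}
--     for v in lst:
--         counts[v] = counts.get(v, 0) + 1
--     x = None
--     best = 0
--     for v, c in counts.items():
--         if c > best:
--             x = v
--             best = c
--     hc = 0
--     run = 0
--     for v in lst:
--         if v == x:
--             run += 1
--             if run > hc:
--                 hc = run
--         else:
--             run = 0
--     return hc
-- ===== Notes on version B (the rewrite author's own statement) =====
-- stated objective: faster
-- what changed: B counts occurrences in one dict pass instead of A's loop over keys with a nested scan of the list, picks the most frequent element in a single strict-improvement argmax pass over the dict items instead of A's separate max pass plus find-first pass, and computes the longest run with a running maximum instead of building A's intermediate run-length list and scanning it by index.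
import Mathlib
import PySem

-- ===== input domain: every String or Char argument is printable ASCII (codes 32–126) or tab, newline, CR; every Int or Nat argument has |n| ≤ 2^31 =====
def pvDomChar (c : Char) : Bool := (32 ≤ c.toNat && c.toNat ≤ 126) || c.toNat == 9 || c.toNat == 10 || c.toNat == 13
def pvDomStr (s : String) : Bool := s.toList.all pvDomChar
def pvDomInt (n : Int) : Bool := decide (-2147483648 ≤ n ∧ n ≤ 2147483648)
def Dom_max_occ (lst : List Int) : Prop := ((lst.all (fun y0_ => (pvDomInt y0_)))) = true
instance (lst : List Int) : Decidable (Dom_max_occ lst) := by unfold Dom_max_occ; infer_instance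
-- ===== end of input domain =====

-- B replaces A's O(n·k) nested counting loops by a single counting pass, fuses A's
-- separate max-pass and find-first-pass into one argmax pass over the dict items, and
-- tracks the longest run in one pass without building the intermediate run-length list.

-- ===== PORT A =====
def max_occ (lst : List Int) : Int :=
  -- dic = {}; for i in lst: dic[i] = 0
  let dic : PySem.Dict Int Int := lst.foldl (fun d i => d.insert i 0) PySem.Dict.empty
  -- for i in dic: for j in lst: if i == j: dic[i] += 1
  let dic := dic.keys.foldl (fun d i =>
      lst.foldl (fun d j => if i == j then d.modify i 0 (· + 1) else d) d) dic
  -- idx = 0; for i in dic: if dic[i] > idx: idx = dic[i]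
  let idx := dic.keys.foldl (fun idx i => if dic.getD i 0 > idx then dic.getD i 0 else idx) 0
  -- x = None; for i in dic: if dic[i] == idx: x = i; break
  let x : Option Int := dic.keys.find? (fun i => dic.getD i 0 == idx)
  -- n = 0; newlst = []; for i in lst: …
  let s := lst.foldl (fun (s : Int × List Int) i =>
      if some i == x then (s.1 + 1, s.2)
      else if some i != x then (0, s.2 ++ [s.1])
      else s) ((0 : Int), ([] : List Int))
  -- newlst.append(n)
  let newlst := s.2 ++ [s.1]
  -- hc = 0; for i in range(len(newlst)): if newlst[i] > hc: hc = newlst[i]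
  (PySem.List.pyRange 0 (PySem.List.len newlst)).foldl
    (fun hc i => if PySem.List.pyGetD newlst i 0 > hc then PySem.List.pyGetD newlst i 0 else hc) 0

-- ===== PORT B =====
def max_occ_alt (lst : List Int) : Int :=
  -- counts = {}; for v in lst: counts[v] = counts.get(v, 0) + 1
  let counts : PySem.Dict Int Int := lst.foldl (fun d v => d.insert v (d.getD v 0 + 1)) PySem.Dict.empty
  -- x = None; best = 0; for v, c in counts.items(): if c > best: x, best = v, c
  let s := counts.items.foldl (fun (s : Option Int × Int) vc =>
      if vc.2 > s.2 then (some vc.1, vc.2) else s) ((none : Option Int), (0 : Int))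
  let x := s.1
  -- hc = 0; run = 0; for v in lst: …
  let t := lst.foldl (fun (t : Int × Int) v =>
      if some v == x then
        let run := t.2 + 1
        (if run > t.1 then run else t.1, run)
      else (t.1, 0)) ((0 : Int), (0 : Int))
  t.1

-- ===== PRECONDITION & SPEC =====
def Spec_max_occ (lst : List Int) (out : Int) : Prop := out = max_occ_alt lst
instance (lst : List Int) (out : Int) : Decidable (Spec_max_occ lst out) := by unfold Spec_max_occ; infer_instance

-- ===== CLAIM (what is proved, stated in full; the proofs are below) =====
def Claim_equal_max_occ : Prop := ∀ (lst : List Int), Dom_max_occ lst → Spec_max_occ lst (max_occ lst)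

-- ===== LEMMAS AND PROOFS =====

-- `if b > a then b else a` is `max a b`
theorem pv_ifmax (a b : Int) : (if b > a then b else a) = max a b := by
  split_ifs <;> omega

-- A's zero-initialisation loop leaves every default-0 lookup at 0
theorem pv_getD_init0 (L : List Int) (d : PySem.Dict Int Int) (v : Int)
    (h : d.getD v 0 = 0) : (L.foldl (fun d i => d.insert i 0) d).getD v 0 = 0 := by
  induction L generalizing d with
  | nil => simpa using h
  | cons i L ih =>
      simp only [List.foldl_cons]
      exact ih _ (by rw [PySem.Dict.getD_insert]; split <;> simp [h])

-- A's inner counting loop over lst, for a fixed key i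
theorem pv_inner_getD (L : List Int) (i : Int) (d : PySem.Dict Int Int) (v : Int) :
    ((L.foldl (fun d j => if i == j then d.modify i 0 (· + 1) else d) d).getD v 0)
      = d.getD v 0 + if v = i then (L.count i : Int) else 0 := by
  induction L generalizing d with
  | nil => simp
  | cons j L ih =>
      simp only [List.foldl_cons]
      by_cases hij : i = j
      · subst hij
        simp only [BEq.rfl, if_true, ih]
        by_cases hvi : v = i
        · subst hvi
          rw [PySem.Dict.getD_modify_self]
          simp
          ring
        · rw [PySem.Dict.getD_modify_of_ne _ _ _ hvi]
          simp [hvi]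
      · have : (i == j) = false := by simp [hij]
        rw [this]
        simp only [ih]
        simp [Ne.symm hij]

-- A's inner counting loop preserves the key list when i is already a key
theorem pv_inner_keys (L : List Int) (i : Int) (d : PySem.Dict Int Int)
    (h : i ∈ d.keys) :
    (L.foldl (fun d j => if i == j then d.modify i 0 (· + 1) else d) d).keys = d.keys := by
  induction L generalizing d with
  | nil => rfl
  | cons j L ih =>
      simp only [List.foldl_cons]
      by_cases hij : i = j
      · subst hij
        simp only [BEq.rfl, if_true]
        have hk : (d.modify i 0 (· + 1)).keys = d.keys := by
          rw [PySem.Dict.keys_modify, PySem.Dict.keys_insert_of_contains]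
          rw [PySem.Dict.contains_iff_mem_keys]; exact h
        rw [ih _ (by rw [hk]; exact h), hk]
      · have : (i == j) = false := by simp [hij]
        rw [this]
        simp only [Bool.false_eq_true, if_false]
        exact ih _ h

-- A's outer counting loop: each processed key accumulates its full count
theorem pv_outer_getD (K : List Int) (lst : List Int) (d : PySem.Dict Int Int) (v : Int) :
    ((K.foldl (fun d i => lst.foldl (fun d j => if i == j then d.modify i 0 (· + 1) else d) d) d).getD v 0)
      = d.getD v 0 + (K.count v : Int) * (lst.count v : Int) := by
  induction K generalizing d with
  | nil => simp
  | cons i K ih =>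
      simp only [List.foldl_cons, ih, pv_inner_getD]
      by_cases hvi : v = i
      · subst hvi; simp; ring
      · simp only [List.count_cons, hvi]
        simp [Ne.symm hvi]

-- A's outer counting loop preserves the keys when it runs over a sublist of the keys
theorem pv_outer_keys (K : List Int) (lst : List Int) (d : PySem.Dict Int Int)
    (h : ∀ i ∈ K, i ∈ d.keys) :
    (K.foldl (fun d i => lst.foldl (fun d j => if i == j then d.modify i 0 (· + 1) else d) d) d).keys = d.keys := by
  induction K generalizing d with
  | nil => rfl
  | cons i K ih =>
      simp only [List.foldl_cons]
      have hk := pv_inner_keys lst i d (h i (by simp))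
      rw [ih _ (by intro a ha; rw [hk]; exact h a (List.mem_cons_of_mem _ ha)), hk]

-- one-pass strict-improvement argmax = (first element attaining the running max, the max)
theorem pv_argmax (c : Int → Int) (K : List Int) (x₀ : Option Int) (b : Int) :
    K.foldl (fun s k => if c k > s.2 then (some k, c k) else s) (x₀, b)
      = (if b < K.foldl (fun a k => max a (c k)) b
           then K.find? (fun k => c k == K.foldl (fun a k => max a (c k)) b)
           else x₀,
         K.foldl (fun a k => max a (c k)) b) := by
  induction K generalizing x₀ b with
  | nil => simp only [List.foldl_nil, lt_self_iff_false, if_false]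
  | cons k K ih =>
      have hle : ∀ (b' : Int), b' ≤ K.foldl (fun a k => max a (c k)) b' := by
        intro b'
        have := (PySem.List.le_foldl_max (K.map c) b').1
        simpa [List.foldl_map] using this
      simp only [List.foldl_cons]
      by_cases h1 : c k > b
      · rw [if_pos h1, ih]
        have hmax : max b (c k) = c k := by omega
        rw [hmax]
        by_cases h2 : c k < K.foldl (fun a k => max a (c k)) (c k)
        · rw [if_pos h2]
          have hb : b < K.foldl (fun a k => max a (c k)) (c k) := lt_trans h1 h2
          rw [if_pos hb]
          rw [List.find?_cons]
          have : (c k == K.foldl (fun a k => max a (c k)) (c k)) = false := by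
            simp; omega
          rw [this]
        · rw [if_neg h2]
          have heq : K.foldl (fun a k => max a (c k)) (c k) = c k := le_antisymm (by omega) (hle _)
          have hb : b < K.foldl (fun a k => max a (c k)) (c k) := by omega
          rw [if_pos hb, List.find?_cons]
          have : (c k == K.foldl (fun a k => max a (c k)) (c k)) = true := by simp [heq]
          rw [this]
      · rw [if_neg h1, ih]
        have hmax : max b (c k) = b := by omega
        rw [hmax]
        by_cases h2 : b < K.foldl (fun a k => max a (c k)) b
        · rw [if_pos h2, if_pos h2, List.find?_cons]
          have hck : c k ≤ b := by omega
          have : (c k == K.foldl (fun a k => max a (c k)) b) = false := by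
            simp; omega
          rw [this]
        · rw [if_neg h2, if_neg h2]

-- find? with pointwise-equal predicates on members
theorem pv_find?_congr (K : List Int) (p q : Int → Bool) (h : ∀ k ∈ K, p k = q k) :
    K.find? p = K.find? q := by
  induction K with
  | nil => rfl
  | cons k K ih =>
      rw [List.find?_cons, List.find?_cons, h k (by simp)]
      split <;> simp [ih fun a ha => h a (List.mem_cons_of_mem _ ha)]

-- the run phase: A's build-list-then-max equals B's one-pass running max
theorem pv_run (x : Option Int) (L : List Int) (n : Int) (acc : List Int) (hc : Int)
    (hhc : hc = max ((acc).foldl max 0) n) :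
    (L.foldl (fun (t : Int × Int) v =>
        if some v == x then
          let run := t.2 + 1
          (if run > t.1 then run else t.1, run)
        else (t.1, 0)) (hc, n)).1
      = (((L.foldl (fun (s : Int × List Int) i =>
            if some i == x then (s.1 + 1, s.2)
            else if some i != x then (0, s.2 ++ [s.1])
            else s) (n, acc)).2
          ++ [(L.foldl (fun (s : Int × List Int) i =>
            if some i == x then (s.1 + 1, s.2)
            else if some i != x then (0, s.2 ++ [s.1])
            else s) (n, acc)).1]).foldl max 0) := by
  induction L generalizing n acc hc with
  | nil =>
      simp only [List.foldl_nil, List.foldl_append, List.foldl_cons, List.foldl_nil]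
      exact hhc
  | cons v L ih =>
      have h0 : (0:Int) ≤ acc.foldl max 0 := (PySem.List.le_foldl_max acc 0).1
      simp only [List.foldl_cons]
      by_cases hv : some v = x
      · have hb : (some v == x) = true := by simp [hv]
        rw [hb]
        simp only [if_true]
        rw [pv_ifmax hc (n + 1)]
        exact ih (n + 1) acc (max hc (n + 1)) (by omega)
      · have hb : (some v == x) = false := by simp [hv]
        have hb' : (some v != x) = true := by simp [bne, hb]
        rw [hb, hb']
        simp only [Bool.false_eq_true, if_false, if_true]
        refine ih 0 (acc ++ [n]) hc ?_
        have : (acc ++ [n]).foldl max 0 = max (acc.foldl max 0) n := by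
          rw [List.foldl_append]; simp
        omega

-- proof-side abbreviations: the count function, the max count, the chosen element, the one-pass run maximum
def pvC (lst : List Int) (k : Int) : Int := (lst.count k : Int)
def pvG (lst : List Int) : Int := (PySem.Set.ofList lst).foldl (fun a k => max a (pvC lst k)) 0
def pvX (lst : List Int) : Option Int := (PySem.Set.ofList lst).find? (fun k => pvC lst k == pvG lst)
def pvRun (x : Option Int) (lst : List Int) : Int :=
  (lst.foldl (fun (t : Int × Int) v =>
      if some v == x then
        let run := t.2 + 1
        (if run > t.1 then run else t.1, run)
      else (t.1, 0)) ((0 : Int), (0 : Int))).1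

theorem pv_X_none (lst : List Int) (h : pvG lst ≤ 0) : pvX lst = none := by
  unfold pvX
  rw [List.find?_eq_none]
  intro k hk
  have hmem : k ∈ lst := (PySem.Set.mem_ofList lst k).1 hk
  have h1 : 1 ≤ lst.count k := List.one_le_count_iff.2 hmem
  simp only [beq_iff_eq, pvC]
  omega

theorem pvLA (lst : List Int) : max_occ lst = pvRun (pvX lst) lst := by
  unfold max_occ
  simp only []
  have hk0 : (List.foldl (fun d i => d.insert i 0) (PySem.Dict.empty : PySem.Dict Int Int) lst).keys
      = PySem.Set.ofList lst := by
    rw [PySem.Dict.keys_foldl_insert (f := fun _ _ => 0)]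
    simp [PySem.Set.update_nil_left]
  rw [hk0]
  rw [pv_outer_keys (PySem.Set.ofList lst) lst _ (fun i hi => by rw [hk0]; exact hi), hk0]
  -- the counted dictionary returns the list count on every key
  have hgd : ∀ v ∈ PySem.Set.ofList lst,
      ((PySem.Set.ofList lst).foldl
        (fun d i => lst.foldl (fun d j => if i == j then d.modify i 0 (· + 1) else d) d)
        (List.foldl (fun d i => d.insert i 0) (PySem.Dict.empty : PySem.Dict Int Int) lst)).getD v 0
      = pvC lst v := by
    intro v hv
    rw [pv_outer_getD]
    rw [pv_getD_init0 lst _ v (by simp)]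
    rw [List.count_eq_one_of_mem (PySem.Set.nodup_ofList lst) hv]
    simp [pvC]
  -- the max loop computes pvG
  rw [PySem.List.foldl_congr_mem (PySem.Set.ofList lst) _ (fun a k => max a (pvC lst k)) 0
    (fun acc x hx => by rw [hgd x hx, pv_ifmax])]
  -- the break loop computes pvX
  rw [pv_find?_congr (PySem.Set.ofList lst) _ (fun k => pvC lst k == pvG lst)
    (fun k hk => by rw [hgd k hk]; rfl)]
  -- the final index loop is a fold over newlst
  rw [PySem.List.foldl_pyRange_pyGetD (f := fun (acc v : Int) => if v > acc then v else acc)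
    _ 0 _ (le_refl 0)]
  have hmax : (fun (acc v : Int) => if v > acc then v else acc) = max :=
    funext fun a => funext fun v => pv_ifmax a v
  simp only [Int.toNat_zero, List.drop_zero]
  rw [hmax]
  unfold pvRun pvX
  exact (pv_run _ lst 0 [] 0 (by simp)).symm

theorem pvLB (lst : List Int) : max_occ_alt lst = pvRun (pvX lst) lst := by
  unfold max_occ_alt
  simp only []
  rw [PySem.Dict.foldl_insert_getD_add_one_eq_counter, PySem.Dict.items_counter,
    List.foldl_map]
  simp only []
  rw [pv_argmax (fun k => ((List.count k lst : Nat) : Int)) (PySem.Set.ofList lst) none 0]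
  have hG : (PySem.Set.ofList lst).foldl (fun a k => max a ((List.count k lst : Nat) : Int)) 0 = pvG lst := rfl
  rw [hG]
  by_cases h : 0 < pvG lst
  · rw [if_pos h]
    unfold pvRun pvX pvC
    rfl
  · rw [if_neg h]
    rw [show (none : Option Int) = pvX lst from (pv_X_none lst (by omega)).symm]
    rfl

-- ===== VERDICT (by name: the statement is the Claim_ definition above) =====
theorem max_occ_spec : Claim_equal_max_occ := by
  intro lst _
  show max_occ lst = max_occ_alt lst
  rw [pvLA, pvLB]
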